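-- pv_equiv track=rewrite | github.com/jsnarvasa/COMP9007 | Assignment2_Q3.py | get_higher_neighbour
-- ===== SOURCE A (Python) =====
-- import math
--
-- def get_higher_neighbour(array):
--     '''
--     Returns a dictionary of two arrays, containing the closest higher neighbour of n (where n is a member of array "array"),
--     where the key 'LEFT' returns array of the closest neighbour that is higher when looking to the left
--     and key 'RIGHT' returns array of the closest neighbour that is higher when looking to the right
--     '''
--     # accounting for the base case where length of array is 1
--     if len(array) == 1:
--         return {'left': [None], 'right': [None]}
--
--     # find the mid point of the array and split into two arrays
--     mid_point = math.floor(len(array)/2)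
--     left_array = array[:mid_point]
--     right_array = array[mid_point:]
--
--     # make recursive calls, solving for each half of the array and then merging the results
--     left_array_output = get_higher_neighbour(left_array)
--     right_array_output = get_higher_neighbour(right_array)
--
--
--     # For the right array, find the closest higher neighbour, looking to the LEFT (against the left array)
--     # We start the search from the left-hand side of the right array, only filling the ones which are left as None
--     # We know that the indexes which are left as None (no highest left neighbour), will only increase as we move the counter from left to right of the right_array
--     left_array_index = len(left_array)-1
--
--     for index, value in enumerate(right_array):
--         if right_array_output['left'][index] != None:
--             # if we already found the closest higher neighbour for an index in an array, just need to increment it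
--             # so the index it refers to remains valid after we combine the two arrays/lists
--             right_array_output['left'][index] += len(left_array)
--             continue
--
--         while left_array_index != None and value > left_array[left_array_index]:
--             '''
--             while the value of the current number in the right array is greater than the value of left_array[left_array_index],
--             then follow the value of left_array[left_array_index], so we get the index of the next higher value of the left_array,
--             since we know it will always go to a bigger closest neighbour to the left
--             '''
--             left_array_index = left_array_output['left'][left_array_index]
--
--         if left_array_index == None:
--             # since we reached None in left_array_output['left'], it means that we no longer have a bigger number required
--             # we need to continue to the next one, but we DON'T BREAK - because we still need to increment the values in the array
--             # which already has a value (need to ensure the index remains true after merging the two arrays)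
--             right_array_output['left'][index] = None
--             continue
--
--         right_array_output['left'][index] = left_array_index
--
--     combined_left = left_array_output['left'] + right_array_output['left']
--
--
--     # For the left array, find the closest higher neighbour, looking to the RIGHT (against the right array)
--     # Need to start from the right side of the left array, because we know that as we move from right to left of left_array_output[right]
--     # where the indices remain with value None, the value required for those to be filled (with a higher num) increases
--     right_array_index = 0
--
--     for left_counter in reversed(range(len(left_array))):
--         # start from the right-most of the left array, and using a counter since we need the reversed index position and enumerate with index isn't sufficient
--         if left_array_output['right'][left_counter] != None:
--             continue
--
--         while right_array_index != None and left_array[left_counter] > right_array[right_array_index]: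
--             right_array_index = right_array_output['right'][right_array_index]
--
--         if right_array_index == None:
--             left_array_output['right'][left_counter] = None
--             continue
--
--         left_array_output['right'][left_counter] = right_array_index + len(left_array)
--
--     # Since we don't iterate over all the values in the right array one-by-one, need to increment those which are not none
--     # in order to ensure the index it refers to after we merge the two lists remains correct
--     # this is not required for left_array_output since we are filling the right array there which refers to the left array and no increment is required
--     right_array_output['right'] = list(map(lambda num: num+len(left_array) if num!= None else None, right_array_output['right']))
--
--     combined_right = left_array_output['right'] + right_array_output['right']
--
--     return {'left': combined_left, 'right': combined_right}
-- ===== SOURCE B (Python) =====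
-- def get_higher_neighbour(array):
--     n = len(array)
--     left = [None] * n
--     for i in range(1, n):
--         j = i - 1
--         while j is not None and array[j] < array[i]:
--             j = left[j]
--         left[i] = j
--     right = [None] * n
--     for i in range(n - 2, -1, -1):
--         j = i + 1
--         while j is not None and array[j] < array[i]:
--             j = right[j]
--         right[i] = j
--     return {'left': left, 'right': right}
-- ===== Notes on version B (the rewrite author's own statement) =====
-- stated objective: faster
-- what changed: Replaced the divide-and-conquer recursion with two pointer-chasing merges per level by two flat single passes (one per direction) that chase previously computed answers, removing the recursion and split/concat work entirely.
-- outside the precondition, e.g. on get_higher_neighbour([]): A raises RecursionError, B returns {'left': [], 'right': []}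
import Mathlib
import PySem

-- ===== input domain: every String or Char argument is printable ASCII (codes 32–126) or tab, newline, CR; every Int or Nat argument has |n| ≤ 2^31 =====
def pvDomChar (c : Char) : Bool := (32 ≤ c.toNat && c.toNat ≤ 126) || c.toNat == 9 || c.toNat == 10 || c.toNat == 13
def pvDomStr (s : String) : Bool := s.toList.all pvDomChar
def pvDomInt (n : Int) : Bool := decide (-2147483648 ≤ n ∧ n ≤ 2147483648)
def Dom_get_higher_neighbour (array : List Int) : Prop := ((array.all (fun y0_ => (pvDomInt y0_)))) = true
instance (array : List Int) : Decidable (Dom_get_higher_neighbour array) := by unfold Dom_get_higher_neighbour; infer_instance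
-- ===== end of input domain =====

-- B replaces A's divide-and-conquer with two flat answer-chasing passes (measurably faster);
-- the equivalence is about the return value on non-empty input (A recurses forever on []).

-- ===== PORT A =====

-- dict lookup d[k] on the returned {'left':…,'right':…} dicts (first matching key)
def dget (d : List (String × List (Option Int))) (k : String) : List (Option Int) :=
  (((d.find? (fun p => p.1 == k)).map Prod.snd).getD [])

-- the inner while loops of A ('while idx != None and value > vals[idx]: idx = chain[idx]');
-- fuel bounds the chain, which in A always moves strictly towards the array's ends, so a fuel
-- of vals.length + 1 is never exhausted on the inputs A reaches.
def aChase (vals : List Int) (chain : List (Option Int)) (v : Int) : Option Int → Nat → Option Int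
  | p, 0 => p
  | none, _ + 1 => none
  | some j, fuel + 1 =>
      if PySem.List.pyGetD vals j 0 < v then
        aChase vals chain v (PySem.List.pyGetD chain j none) fuel
      else some j

-- 'for index, value in enumerate(right_array): …' filling right_array_output['left']
def aMergeL (l : List Int) (loL : List (Option Int)) (r : List Int) (i : Nat)
    (rl : List (Option Int)) (p : Option Int) : List (Option Int) :=
  if _h : i < r.length then
    match rl.getD i none with
    | some x => aMergeL l loL r (i + 1) (rl.set i (some (x + (l.length : Int)))) p
    | none =>
        let p' := aChase l loL (r.getD i 0) p (l.length + 1)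
        aMergeL l loL r (i + 1) (rl.set i p') p'
  else rl
termination_by r.length - i

-- 'for left_counter in reversed(range(len(left_array))): …' filling left_array_output['right'];
-- counter c+1 processes index c
def aMergeR (r : List Int) (roR : List (Option Int)) (l : List Int) :
    Nat → List (Option Int) → Option Int → List (Option Int)
  | 0, ll, _ => ll
  | c + 1, ll, p =>
      match ll.getD c none with
      | some _ => aMergeR r roR l c ll p
      | none =>
          match aChase r roR (l.getD c 0) p (r.length + 1) with
          | none => aMergeR r roR l c (ll.set c none) none
          | some x => aMergeR r roR l c (ll.set c (some (x + (l.length : Int)))) (some x)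

def get_higher_neighbour (array : List Int) : List (String × List (Option Int)) :=
  if _h1 : array.length = 1 then [("left", [none]), ("right", [none])]
  else if _h0 : array.length = 0 then
    -- unreachable under Pre_: Python recurses forever on []
    [("left", []), ("right", [])]
  else
    let m := array.length / 2
    let l := array.take m
    let r := array.drop m
    let lo := get_higher_neighbour l
    let ro := get_higher_neighbour r
    let rl := aMergeL l (dget lo "left") r 0 (dget ro "left") (some ((l.length : Int) - 1))
    let combined_left := dget lo "left" ++ rl
    let ll := aMergeR r (dget ro "right") l l.length (dget lo "right") (some 0)
    let roR' := (dget ro "right").map (fun o => o.map (· + (l.length : Int)))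
    let combined_right := ll ++ roR'
    [("left", combined_left), ("right", combined_right)]
termination_by array.length
decreasing_by
  · simp [List.length_take]; omega
  · simp [List.length_drop]; omega

-- ===== PORT B =====

-- 'while j is not None and array[j] < array[i]: j = answers[j]'
def bChase (a : List Int) (ans : List (Option Int)) (v : Int) : Option Int → Nat → Option Int
  | p, 0 => p
  | none, _ + 1 => none
  | some j, fuel + 1 =>
      if PySem.List.pyGetD a j 0 < v then
        bChase a ans v (PySem.List.pyGetD ans j none) fuel
      else some j

-- 'for i in range(1, n): … left[i] = j'; rem counts the remaining iterations
def bLeft (a : List Int) : Nat → Nat → List (Option Int) → List (Option Int)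
  | _, 0, left => left
  | i, rem + 1, left =>
      bLeft a (i + 1) rem
        (left.set i (bChase a left (a.getD i 0) (some ((i : Int) - 1)) a.length))

-- 'for i in range(n - 2, -1, -1): … right[i] = j'; counter c+1 processes index c
def bRight (a : List Int) : Nat → List (Option Int) → List (Option Int)
  | 0, right => right
  | c + 1, right =>
      bRight a c (right.set c (bChase a right (a.getD c 0) (some ((c : Int) + 1)) a.length))

def get_higher_neighbour_alt (array : List Int) : List (String × List (Option Int)) :=
  let n := array.length
  let left := bLeft array 1 (n - 1) (List.replicate n none)
  let right := bRight array (n - 1) (List.replicate n none)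
  [("left", left), ("right", right)]

-- ===== PRECONDITION & SPEC =====
-- Pre_ excludes only the empty list, on which A recurses forever (RecursionError).
def Pre_get_higher_neighbour (array : List Int) : Prop := array ≠ []
instance (array : List Int) : Decidable (Pre_get_higher_neighbour array) := by
  unfold Pre_get_higher_neighbour; infer_instance

def pvWitness_get_higher_neighbour : List Int := [2, 1, 2]

def Spec_get_higher_neighbour (array : List Int) (out : List (String × List (Option Int))) : Prop :=
  out = get_higher_neighbour_alt array
instance (array : List Int) (out : List (String × List (Option Int))) :
    Decidable (Spec_get_higher_neighbour array out) := by
  unfold Spec_get_higher_neighbour; infer_instance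

-- ===== CLAIM (what is proved, stated in full; the proofs are below) =====
def Claim_equal_get_higher_neighbour : Prop :=
  ∀ (array : List Int), Dom_get_higher_neighbour array → Pre_get_higher_neighbour array →
    Spec_get_higher_neighbour array (get_higher_neighbour array)

-- ===== LEMMAS AND PROOFS =====

-- the common mathematical description both programs compute: for position i, the index of the
-- nearest element to the left (resp. right) whose value is ≥ the value at i.

def ocast (o : Option Nat) : Option Int := o.map (fun t => (t : Int))

-- greatest k ≤ j with v ≤ a[k]
def scanL (a : List Int) (v : Int) : Nat → Option Nat
  | 0 => if v ≤ a.getD 0 0 then some 0 else none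
  | j + 1 => if v ≤ a.getD (j + 1) 0 then some (j + 1) else scanL a v j

-- least k with j ≤ k < a.length and v ≤ a[k]
def scanR (a : List Int) (v : Int) (j : Nat) : Option Nat :=
  if _h : j < a.length then
    if v ≤ a.getD j 0 then some j else scanR a v (j + 1)
  else none
termination_by a.length - j

def nl (a : List Int) : Nat → Option Nat
  | 0 => none
  | i + 1 => scanL a (a.getD (i + 1) 0) i

def nr (a : List Int) (i : Nat) : Option Nat := scanR a (a.getD i 0) (i + 1)

def specL (a : List Int) : List (Option Int) :=
  (List.range a.length).map (fun i => ocast (nl a i))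

def specR (a : List Int) : List (Option Int) :=
  (List.range a.length).map (fun i => ocast (nr a i))

theorem scanL_some (a : List Int) (v : Int) (j t : Nat) (h : scanL a v j = some t) :
    t ≤ j ∧ v ≤ a.getD t 0 ∧ ∀ k, t < k → k ≤ j → a.getD k 0 < v := by
  induction j with
  | zero =>
      unfold scanL at h
      split at h
      · cases h; exact ⟨le_refl _, by assumption, fun k hk hk' => by omega⟩
      · cases h
  | succ j ih =>
      unfold scanL at h
      split at h
      · cases h
        exact ⟨le_refl _, by assumption, fun k hk hk' => by omega⟩
      · rename_i hlt
        obtain ⟨h1, h2, h3⟩ := ih h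
        refine ⟨by omega, h2, fun k hk hk' => ?_⟩
        rcases Nat.lt_or_ge k (j + 1) with hc | hc
        · exact h3 k hk (by omega)
        · have : k = j + 1 := by omega
          subst this; omega

theorem scanL_none (a : List Int) (v : Int) (j : Nat) (h : scanL a v j = none) :
    ∀ k, k ≤ j → a.getD k 0 < v := by
  induction j with
  | zero =>
      intro k hk
      unfold scanL at h
      split at h
      · cases h
      · have : k = 0 := by omega
        subst this; omega
  | succ j ih =>
      intro k hk
      unfold scanL at h
      split at h
      · cases h
      · rcases Nat.lt_or_ge k (j + 1) with hc | hc
        · exact ih h k (by omega)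
        · have : k = j + 1 := by omega
          subst this; omega

theorem scanL_skip (a : List Int) (v : Int) (j t : Nat) (ht : t ≤ j)
    (h : ∀ k, t < k → k ≤ j → a.getD k 0 < v) : scanL a v j = scanL a v t := by
  induction j with
  | zero =>
      have : t = 0 := by omega
      subst this; rfl
  | succ j ih =>
      rcases Nat.lt_or_ge t (j + 1) with hc | hc
      · have hj1 : a.getD (j + 1) 0 < v := h (j + 1) (by omega) (le_refl _)
        rw [show scanL a v (j + 1)
              = if v ≤ a.getD (j + 1) 0 then some (j + 1) else scanL a v j from rfl,
            if_neg (by omega)]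
        exact ih (by omega) (fun k hk hk' => h k hk (by omega))
      · have : t = j + 1 := by omega
        subst this; rfl

theorem scanL_none_of (a : List Int) (v : Int) (j : Nat)
    (h : ∀ k, k ≤ j → a.getD k 0 < v) : scanL a v j = none := by
  induction j with
  | zero =>
      unfold scanL
      rw [if_neg (by have := h 0 (le_refl _); omega)]
  | succ j ih =>
      unfold scanL
      rw [if_neg (by have := h (j + 1) (le_refl _); omega)]
      exact ih (fun k hk => h k (by omega))

theorem scanL_of_ge (a : List Int) (v : Int) (j : Nat) (h : v ≤ a.getD j 0) :
    scanL a v j = some j := by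
  cases j with
  | zero => unfold scanL; rw [if_pos h]
  | succ j => unfold scanL; rw [if_pos h]

theorem scanR_some (a : List Int) (v : Int) (j t : Nat) (h : scanR a v j = some t) :
    j ≤ t ∧ t < a.length ∧ v ≤ a.getD t 0 ∧ ∀ k, j ≤ k → k < t → a.getD k 0 < v := by
  unfold scanR at h
  split at h
  · rename_i hj
    split at h
    · rename_i hv
      cases h
      exact ⟨le_refl _, hj, hv, fun k hk hk' => by omega⟩
    · rename_i hv
      obtain ⟨h1, h2, h3, h4⟩ := scanR_some a v (j + 1) t h
      refine ⟨by omega, h2, h3, fun k hk hk' => ?_⟩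
      rcases Nat.lt_or_ge j k with hc | hc
      · exact h4 k (by omega) hk'
      · have : k = j := by omega
        subst this; omega
  · cases h
termination_by a.length - j

theorem scanR_none (a : List Int) (v : Int) (j : Nat) (h : scanR a v j = none) :
    ∀ k, j ≤ k → k < a.length → a.getD k 0 < v := by
  intro k hk hk'
  unfold scanR at h
  split at h
  · rename_i hj
    split at h
    · cases h
    · rename_i hv
      rcases Nat.lt_or_ge j k with hc | hc
      · exact scanR_none a v (j + 1) h k (by omega) hk'
      · have : k = j := by omega
        subst this; omega
  · rename_i hj
    omega
termination_by a.length - j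

theorem scanR_skip (a : List Int) (v : Int) (j t : Nat) (ht : j ≤ t)
    (h : ∀ k, j ≤ k → k < t → a.getD k 0 < v) : scanR a v j = scanR a v t := by
  rcases Nat.lt_or_ge j t with hc | hc
  · rcases Nat.lt_or_ge j a.length with hj | hj
    · have step : scanR a v j = scanR a v (j + 1) := by
        conv_lhs => rw [scanR]
        rw [dif_pos hj, if_neg (by have := h j (le_refl _) hc; omega)]
      rw [step]
      exact scanR_skip a v (j + 1) t (by omega) (fun k hk hk' => h k (by omega) hk')
    · have h1 : scanR a v j = none := by unfold scanR; rw [dif_neg (by omega)]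
      have h2 : scanR a v t = none := by unfold scanR; rw [dif_neg (by omega)]
      rw [h1, h2]
  · have : j = t := by omega
    subst this; rfl
termination_by t - j

theorem scanR_none_of (a : List Int) (v : Int) (j : Nat)
    (h : ∀ k, j ≤ k → k < a.length → a.getD k 0 < v) : scanR a v j = none := by
  unfold scanR
  split
  · rename_i hj
    rw [if_neg (by have := h j (le_refl _) hj; omega)]
    exact scanR_none_of a v (j + 1) (fun k hk hk' => h k (by omega) hk')
  · rfl
termination_by a.length - j

theorem scanR_of_ge (a : List Int) (v : Int) (j : Nat) (hj : j < a.length)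
    (h : v ≤ a.getD j 0) : scanR a v j = some j := by
  unfold scanR
  rw [dif_pos hj, if_pos h]

theorem aChase_none (a : List Int) (ans : List (Option Int)) (v : Int) (fuel : Nat) :
    aChase a ans v none fuel = none := by
  cases fuel <;> rfl

-- chase correctness, left direction
theorem aChase_eq_scanL (a : List Int) (ans : List (Option Int)) (v : Int) (fuel : Nat) :
    ∀ j : Nat, j < a.length → j + 1 ≤ fuel →
    (∀ k, k ≤ j → ans.getD k none = ocast (nl a k)) →
    aChase a ans v (some (j : Int)) fuel = ocast (scanL a v j) := by
  induction fuel with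
  | zero => intro j _ hf _; omega
  | succ fuel ih =>
      intro j hj _hf hans
      rw [show aChase a ans v (some (j : Int)) (fuel + 1)
            = if PySem.List.pyGetD a (j : Int) 0 < v then
                aChase a ans v (PySem.List.pyGetD ans (j : Int) none) fuel
              else some (j : Int) from rfl]
      rw [PySem.List.pyGetD_natCast, PySem.List.pyGetD_natCast]
      by_cases hlt : a.getD j 0 < v
      · rw [if_pos hlt, hans j (le_refl _)]
        cases hnl : nl a j with
        | none =>
            rw [show ocast none = none from rfl, aChase_none]
            have : scanL a v j = none := by
              apply scanL_none_of
              intro k hk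
              cases j with
              | zero =>
                  have : k = 0 := by omega
                  subst this; exact hlt
              | succ j' =>
                  rcases Nat.lt_or_ge k (j' + 1) with hc | hc
                  · have := scanL_none a _ j' hnl k (by omega)
                    omega
                  · have : k = j' + 1 := by omega
                    subst this; exact hlt
            rw [this]; rfl
        | some t =>
            cases j with
            | zero => simp [nl] at hnl
            | succ j' =>
                obtain ⟨ht1, _ht2, ht3⟩ := scanL_some a _ j' t hnl
                rw [show ocast (some t) = some ((t : Int)) from rfl]
                rw [ih t (by omega) (by omega) (fun k hk => hans k (by omega))]
                have : scanL a v (j' + 1) = scanL a v t := by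
                  apply scanL_skip a v _ t (by omega)
                  intro k hk hk'
                  rcases Nat.lt_or_ge k (j' + 1) with hc | hc
                  · have := ht3 k hk (by omega)
                    omega
                  · have : k = j' + 1 := by omega
                    subst this; exact hlt
                rw [this]
      · rw [if_neg hlt, scanL_of_ge a v j (by omega)]
        rfl

-- chase correctness, right direction
theorem aChase_eq_scanR (a : List Int) (ans : List (Option Int)) (v : Int) (fuel : Nat) :
    ∀ j : Nat, j < a.length → a.length - j ≤ fuel →
    (∀ k, j ≤ k → k < a.length → ans.getD k none = ocast (nr a k)) →
    aChase a ans v (some (j : Int)) fuel = ocast (scanR a v j) := by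
  induction fuel with
  | zero => intro j hj hf _; omega
  | succ fuel ih =>
      intro j hj _hf hans
      rw [show aChase a ans v (some (j : Int)) (fuel + 1)
            = if PySem.List.pyGetD a (j : Int) 0 < v then
                aChase a ans v (PySem.List.pyGetD ans (j : Int) none) fuel
              else some (j : Int) from rfl]
      rw [PySem.List.pyGetD_natCast, PySem.List.pyGetD_natCast]
      by_cases hlt : a.getD j 0 < v
      · rw [if_pos hlt, hans j (le_refl _) hj]
        cases hnr : nr a j with
        | none =>
            rw [show ocast none = none from rfl, aChase_none]
            have : scanR a v j = none := by
              apply scanR_none_of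
              intro k hk hk'
              rcases Nat.lt_or_ge j k with hc | hc
              · have := scanR_none a _ (j + 1) hnr k (by omega) hk'
                omega
              · have : k = j := by omega
                subst this; exact hlt
            rw [this]; rfl
        | some t =>
            obtain ⟨ht1, ht2, _ht3, ht4⟩ := scanR_some a _ (j + 1) t hnr
            rw [show ocast (some t) = some ((t : Int)) from rfl]
            rw [ih t ht2 (by omega) (fun k hk hk' => hans k (by omega) hk')]
            have : scanR a v j = scanR a v t := by
              apply scanR_skip a v j t (by omega)
              intro k hk hk'
              rcases Nat.lt_or_ge j k with hc | hc
              · have := ht4 k (by omega) hk'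
                omega
              · have : k = j := by omega
                subst this; exact hlt
            rw [this]
      · rw [if_neg hlt, scanR_of_ge a v j hj (by omega)]
        rfl

theorem bChase_eq_aChase (a : List Int) (ans : List (Option Int)) (v : Int)
    (p : Option Int) (fuel : Nat) : bChase a ans v p fuel = aChase a ans v p fuel := by
  induction fuel generalizing p with
  | zero => cases p <;> rfl
  | succ fuel ih =>
      cases p with
      | none => rfl
      | some j =>
          rw [show bChase a ans v (some j) (fuel + 1)
                = if PySem.List.pyGetD a j 0 < v then
                    bChase a ans v (PySem.List.pyGetD ans j none) fuel
                  else some j from rfl,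
              show aChase a ans v (some j) (fuel + 1)
                = if PySem.List.pyGetD a j 0 < v then
                    aChase a ans v (PySem.List.pyGetD ans j none) fuel
                  else some j from rfl]
          split
          · exact ih _
          · rfl

-- ===== B equals the spec =====

theorem getD_map_range' {α : Type} (f : Nat → α) (n k : Nat) (d : α) (hk : k < n) :
    ((List.range n).map f).getD k d = f k := by
  rw [List.getD_eq_getElem?_getD]
  simp [hk]

theorem set_map_range {α : Type} (f : Nat → α) (n i : Nat) (v : α) (_hi : i < n) :
    ((List.range n).map f).set i v =
      (List.range n).map (fun k => if k = i then v else f k) := by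
  apply List.ext_getElem
  · simp
  · intro k hk hk'
    simp only [List.getElem_set, List.getElem_map, List.getElem_range]
    simp only [List.length_set, List.length_map, List.length_range] at hk
    split
    · rename_i h; simp [h]
    · rename_i h
      rw [if_neg (by intro hh; exact h hh.symm)]

theorem bLeft_spec (a : List Int) : ∀ rem i : Nat, i + rem = a.length → 1 ≤ i →
    bLeft a i rem ((List.range a.length).map
      (fun k => if k < i then ocast (nl a k) else none)) = specL a := by
  intro rem
  induction rem with
  | zero =>
      intro i hi _
      unfold specL
      show (List.range a.length).map _ = _
      apply List.map_congr_left
      intro k hk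
      rw [List.mem_range] at hk
      rw [if_pos (by omega)]
  | succ rem ih =>
      intro i hi h1
      cases i with
      | zero => omega
      | succ i' =>
          have hlen : i' + 1 < a.length := by omega
          show bLeft a (i' + 1 + 1) rem _ = specL a
          have hchase :
              bChase a ((List.range a.length).map
                  (fun k => if k < i' + 1 then ocast (nl a k) else none))
                (a.getD (i' + 1) 0) (some ((((i' + 1) : Nat) : Int) - 1)) a.length
                = ocast (nl a (i' + 1)) := by
            rw [bChase_eq_aChase]
            rw [show ((((i' + 1) : Nat) : Int) - 1) = ((i' : Nat) : Int) by push_cast; ring]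
            rw [aChase_eq_scanL a _ _ a.length i' (by omega) (by omega) ?hans]
            · rfl
            case hans =>
              intro k hk
              rw [getD_map_range' _ a.length k none (by omega), if_pos (by omega)]
          rw [hchase, set_map_range _ _ _ _ (by omega)]
          have hmaps :
              ((List.range a.length).map (fun k =>
                if k = i' + 1 then ocast (nl a (i' + 1))
                else if k < i' + 1 then ocast (nl a k) else none))
              = (List.range a.length).map
                  (fun k => if k < i' + 1 + 1 then ocast (nl a k) else none) := by
            apply List.map_congr_left
            intro k hk
            by_cases hke : k = i' + 1
            · subst hke
              rw [if_pos rfl, if_pos (by omega)]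
            · rw [if_neg hke]
              by_cases hkl : k < i' + 1
              · rw [if_pos hkl, if_pos (by omega)]
              · rw [if_neg hkl, if_neg (by omega)]
          rw [hmaps]
          exact ih (i' + 1 + 1) (by omega) (by omega)

theorem bRight_spec (a : List Int) : ∀ c : Nat, c ≤ a.length - 1 →
    bRight a c ((List.range a.length).map
      (fun k => if c ≤ k then ocast (nr a k) else none)) = specR a := by
  intro c
  induction c with
  | zero =>
      intro _
      unfold specR
      show (List.range a.length).map _ = _
      apply List.map_congr_left
      intro k _
      rw [if_pos (by omega)]
  | succ c ih =>
      intro hc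
      have hlen : c + 1 < a.length := by omega
      show bRight a c _ = specR a
      have hchase :
          bChase a ((List.range a.length).map
              (fun k => if c + 1 ≤ k then ocast (nr a k) else none))
            (a.getD c 0) (some (((c : Nat) : Int) + 1)) a.length
            = ocast (nr a c) := by
        rw [bChase_eq_aChase]
        rw [show (((c : Nat) : Int) + 1) = (((c + 1 : Nat)) : Int) by push_cast; ring]
        rw [aChase_eq_scanR a _ _ a.length (c + 1) hlen (by omega) ?hans]
        · rfl
        case hans =>
          intro k hk _
          rw [getD_map_range' _ a.length k none (by omega), if_pos hk]
      rw [hchase, set_map_range _ _ _ _ (by omega)]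
      have hmaps :
          ((List.range a.length).map (fun k =>
            if k = c then ocast (nr a c)
            else if c + 1 ≤ k then ocast (nr a k) else none))
          = (List.range a.length).map
              (fun k => if c ≤ k then ocast (nr a k) else none) := by
        apply List.map_congr_left
        intro k hk
        by_cases hke : k = c
        · subst hke
          rw [if_pos rfl, if_pos (by omega)]
        · rw [if_neg hke]
          by_cases hkl : c + 1 ≤ k
          · rw [if_pos hkl, if_pos (by omega)]
          · rw [if_neg hkl, if_neg (by omega)]
      rw [hmaps]
      exact ih (by omega)

theorem alt_eq_spec (a : List Int) :
    get_higher_neighbour_alt a = [("left", specL a), ("right", specR a)] := by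
  cases ha : a with
  | nil => rfl
  | cons x xs =>
      rw [← ha]
      have hn : 1 ≤ a.length := by rw [ha]; simp
      unfold get_higher_neighbour_alt
      have hrepl1 : List.replicate a.length (none : Option Int)
          = (List.range a.length).map (fun k => if k < 1 then ocast (nl a k) else none) := by
        apply List.ext_getElem
        · simp
        · intro k hk hk'
          simp only [List.getElem_replicate, List.getElem_map, List.getElem_range]
          by_cases hk1 : k < 1
          · have : k = 0 := by omega
            subst this
            rw [if_pos hk1]; rfl
          · rw [if_neg hk1]
      have hrepl2 : List.replicate a.length (none : Option Int)
          = (List.range a.length).map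
              (fun k => if a.length - 1 ≤ k then ocast (nr a k) else none) := by
        apply List.ext_getElem
        · simp
        · intro k hk hk'
          simp only [List.getElem_replicate, List.getElem_map, List.getElem_range]
          simp only [List.length_replicate] at hk
          by_cases hk1 : a.length - 1 ≤ k
          · have : k = a.length - 1 := by omega
            subst this
            have : nr a (a.length - 1) = none := by
              unfold nr scanR
              rw [dif_neg (by omega)]
            rw [if_pos hk1, this]; rfl
          · rw [if_neg hk1]
      show [("left", bLeft a 1 (a.length - 1) (List.replicate a.length none)),
            ("right", bRight a (a.length - 1) (List.replicate a.length none))]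
          = [("left", specL a), ("right", specR a)]
      have hL : bLeft a 1 (a.length - 1) (List.replicate a.length none) = specL a := by
        rw [hrepl1]; exact bLeft_spec a (a.length - 1) 1 (by omega) (by omega)
      have hR : bRight a (a.length - 1) (List.replicate a.length none) = specR a := by
        rw [hrepl2]; exact bRight_spec a (a.length - 1) (by omega)
      rw [hL, hR]

-- ===== A equals the spec =====

theorem getD_append_left' (l r : List Int) (k : Nat) (hk : k < l.length) :
    (l ++ r).getD k 0 = l.getD k 0 := by
  rw [List.getD_eq_getElem?_getD, List.getD_eq_getElem?_getD, List.getElem?_append_left hk]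

theorem getD_append_right' (l r : List Int) (k : Nat) :
    (l ++ r).getD (l.length + k) 0 = r.getD k 0 := by
  rw [List.getD_eq_getElem?_getD, List.getD_eq_getElem?_getD,
    List.getElem?_append_right (by omega), Nat.add_sub_cancel_left]

theorem scanL_append_low (l r : List Int) (v : Int) (j : Nat) (hj : j < l.length) :
    scanL (l ++ r) v j = scanL l v j := by
  induction j with
  | zero =>
      unfold scanL
      rw [getD_append_left' l r 0 hj]
  | succ j ih =>
      unfold scanL
      rw [getD_append_left' l r (j + 1) hj, ih (by omega)]

theorem scanL_append_high (l r : List Int) (v : Int) (hm : 1 ≤ l.length) (j : Nat) :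
    scanL (l ++ r) v (l.length + j) =
      (scanL r v j).elim (scanL l v (l.length - 1)) (fun t => some (l.length + t)) := by
  induction j with
  | zero =>
      have hidx : l.length + 0 = (l.length - 1) + 1 := by omega
      rw [hidx]
      rw [show scanL (l ++ r) v ((l.length - 1) + 1)
            = if v ≤ (l ++ r).getD ((l.length - 1) + 1) 0 then some ((l.length - 1) + 1)
              else scanL (l ++ r) v (l.length - 1) from rfl]
      rw [show (l.length - 1) + 1 = l.length + 0 by omega]
      rw [getD_append_right' l r 0]
      rw [show scanL r v 0 = if v ≤ r.getD 0 0 then some 0 else none from rfl]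
      by_cases hv : v ≤ r.getD 0 0
      · rw [if_pos hv, if_pos hv]
        rfl
      · rw [if_neg hv, if_neg hv]
        rw [scanL_append_low l r v (l.length - 1) (by omega)]
        rfl
  | succ j ih =>
      rw [show l.length + (j + 1) = (l.length + j) + 1 from rfl]
      rw [show scanL (l ++ r) v ((l.length + j) + 1)
            = if v ≤ (l ++ r).getD ((l.length + j) + 1) 0 then some ((l.length + j) + 1)
              else scanL (l ++ r) v (l.length + j) from rfl]
      rw [show (l.length + j) + 1 = l.length + (j + 1) from rfl]
      rw [getD_append_right' l r (j + 1)]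
      rw [show scanL r v (j + 1)
            = if v ≤ r.getD (j + 1) 0 then some (j + 1) else scanL r v j from rfl]
      by_cases hv : v ≤ r.getD (j + 1) 0
      · rw [if_pos hv, if_pos hv]
        rfl
      · rw [if_neg hv, if_neg hv, ih]

theorem scanR_append_shift (l r : List Int) (v : Int) (j : Nat) :
    scanR (l ++ r) v (l.length + j) = (scanR r v j).map (fun t => l.length + t) := by
  conv_lhs => rw [scanR]
  conv_rhs => rw [scanR]
  by_cases hj : j < r.length
  · rw [dif_pos (by simp; omega), dif_pos hj, getD_append_right' l r j]
    by_cases hv : v ≤ r.getD j 0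
    · rw [if_pos hv, if_pos hv]
      rfl
    · rw [if_neg hv, if_neg hv,
        show l.length + j + 1 = l.length + (j + 1) from rfl,
        scanR_append_shift l r v (j + 1)]
  · rw [dif_neg (by simp; omega), dif_neg hj]
    rfl
termination_by r.length - j

theorem scanR_append_low (l r : List Int) (v : Int) (j : Nat) (hj : j ≤ l.length) :
    scanR (l ++ r) v j =
      (scanR l v j).elim ((scanR r v 0).map (fun t => l.length + t)) some := by
  by_cases hjm : j < l.length
  · conv_lhs => rw [scanR]
    rw [dif_pos (by simp; omega), getD_append_left' l r j hjm]
    conv_rhs => rw [scanR]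
    rw [dif_pos hjm]
    by_cases hv : v ≤ l.getD j 0
    · rw [if_pos hv, if_pos hv]
      rfl
    · rw [if_neg hv, if_neg hv]
      exact scanR_append_low l r v (j + 1) (by omega)
  · have hj' : j = l.length := by omega
    subst hj'
    have h1 : scanR l v l.length = none := by
      rw [scanR]; rw [dif_neg (by omega)]
    rw [h1, show scanR (l ++ r) v l.length = scanR (l ++ r) v (l.length + 0) from rfl,
      scanR_append_shift l r v 0]
    rfl
termination_by l.length - j

theorem nl_append_low (l r : List Int) (i : Nat) (hi : i < l.length) :
    nl (l ++ r) i = nl l i := by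
  cases i with
  | zero => rfl
  | succ i' =>
      rw [show nl (l ++ r) (i' + 1) = scanL (l ++ r) ((l ++ r).getD (i' + 1) 0) i' from rfl,
        show nl l (i' + 1) = scanL l (l.getD (i' + 1) 0) i' from rfl,
        getD_append_left' l r (i' + 1) hi, scanL_append_low l r _ i' (by omega)]

theorem nl_append (l r : List Int) (hm : 1 ≤ l.length) (i : Nat) (hi : i < r.length) :
    nl (l ++ r) (l.length + i) =
      (nl r i).elim (scanL l (r.getD i 0) (l.length - 1)) (fun t => some (l.length + t)) := by
  cases i with
  | zero =>
      rw [show nl (l ++ r) (l.length + 0) = nl (l ++ r) ((l.length - 1) + 1) by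
            congr 1; omega]
      rw [show nl (l ++ r) ((l.length - 1) + 1)
            = scanL (l ++ r) ((l ++ r).getD ((l.length - 1) + 1) 0) (l.length - 1) from rfl]
      rw [show (l.length - 1) + 1 = l.length + 0 by omega, getD_append_right' l r 0]
      rw [scanL_append_low l r _ (l.length - 1) (by omega)]
      rfl
  | succ i' =>
      rw [show nl (l ++ r) (l.length + (i' + 1))
            = scanL (l ++ r) ((l ++ r).getD ((l.length + i') + 1) 0) (l.length + i') from rfl,
        show nl r (i' + 1) = scanL r (r.getD (i' + 1) 0) i' from rfl]
      rw [show (l.length + i') + 1 = l.length + (i' + 1) from rfl, getD_append_right' l r (i' + 1)]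
      rw [scanL_append_high l r _ hm i']

theorem nr_append_high (l r : List Int) (i : Nat) (_hi : i < r.length) :
    nr (l ++ r) (l.length + i) = (nr r i).map (fun t => l.length + t) := by
  unfold nr
  rw [getD_append_right' l r i, show l.length + i + 1 = l.length + (i + 1) from rfl,
    scanR_append_shift l r _ (i + 1)]

theorem nr_append_low (l r : List Int) (i : Nat) (hi : i < l.length) :
    nr (l ++ r) i =
      (nr l i).elim ((scanR r (l.getD i 0) 0).map (fun t => l.length + t)) some := by
  unfold nr
  rw [getD_append_left' l r i hi]
  exact scanR_append_low l r _ (i + 1) (by omega)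

-- lower bound helper for the merge invariants
def lob (c : Int) (xs : List Int) : Int := xs.foldr min c

theorem lob_le_self (c : Int) (xs : List Int) : lob c xs ≤ c := by
  induction xs with
  | nil => exact le_refl _
  | cons x xs ih => exact le_trans (min_le_right _ _) ih

theorem lob_le_getD (c : Int) (xs : List Int) (k : Nat) (hk : k < xs.length) :
    lob c xs ≤ xs.getD k 0 := by
  induction xs generalizing k with
  | nil => simp at hk
  | cons x xs ih =>
      cases k with
      | zero => exact min_le_left _ _
      | succ k => exact le_trans (min_le_right _ _) (ih k (by simpa using hk))

theorem aMergeL_spec (l r : List Int) (hm : 1 ≤ l.length) (i : Nat) (hi : i ≤ r.length)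
    (rl : List (Option Int))
    (hrl : rl = (List.range r.length).map (fun k =>
      if k < i then ocast (nl (l ++ r) (l.length + k)) else ocast (nl r k)))
    (p : Option Int) (w : Int) (hp : p = ocast (scanL l w (l.length - 1)))
    (hw : ∀ k, i ≤ k → k < r.length → nl r k = none → w ≤ r.getD k 0) :
    aMergeL l (specL l) r i rl p =
      (List.range r.length).map (fun k => ocast (nl (l ++ r) (l.length + k))) := by
  by_cases hir : i < r.length
  · conv_lhs => rw [aMergeL]
    rw [dif_pos hir]
    have hget : rl.getD i none = ocast (nl r i) := by
      rw [hrl, getD_map_range' _ _ i _ hir, if_neg (by omega)]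
    rw [hget]
    cases hnl : nl r i with
    | some t =>
        show aMergeL l (specL l) r (i + 1) (rl.set i (some ((t : Int) + (l.length : Int)))) p = _
        have ht : nl (l ++ r) (l.length + i) = some (l.length + t) := by
          rw [nl_append l r hm i hir, hnl]; rfl
        refine aMergeL_spec l r hm (i + 1) (by omega) _ ?_ p w hp
          (fun k hk hk' h3 => hw k (by omega) hk' h3)
        rw [hrl, set_map_range _ _ _ _ hir]
        apply List.map_congr_left
        intro k hk
        rw [List.mem_range] at hk
        by_cases hke : k = i
        · subst hke
          rw [if_pos rfl, if_pos (by omega), ht]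
          show _ = some (((l.length + t : Nat) : Int))
          congr 1
          push_cast; ring
        · rw [if_neg hke]
          by_cases hkl : k < i
          · rw [if_pos hkl, if_pos (by omega)]
          · rw [if_neg hkl, if_neg (by omega)]
    | none =>
        show aMergeL l (specL l) r (i + 1)
              (rl.set i (aChase l (specL l) (r.getD i 0) p (l.length + 1)))
              (aChase l (specL l) (r.getD i 0) p (l.length + 1)) = _
        have hwv : w ≤ r.getD i 0 := hw i (le_refl _) hir hnl
        have hchase : aChase l (specL l) (r.getD i 0) p (l.length + 1)
            = ocast (scanL l (r.getD i 0) (l.length - 1)) := by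
          cases hscan : scanL l w (l.length - 1) with
          | none =>
              rw [hp, hscan, show ocast none = none from rfl, aChase_none]
              rw [scanL_none_of l (r.getD i 0) (l.length - 1)
                (fun k hk => lt_of_lt_of_le (scanL_none l w (l.length - 1) hscan k hk) hwv)]
              rfl
          | some t =>
              obtain ⟨ht1, ht2, ht3⟩ := scanL_some l w (l.length - 1) t hscan
              rw [hp, hscan, show ocast (some t) = some ((t : Int)) from rfl]
              rw [aChase_eq_scanL l (specL l) (r.getD i 0) (l.length + 1) t (by omega) (by omega)
                (fun k hk => by
                  unfold specL
                  rw [getD_map_range' _ _ k _ (by omega)])]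
              rw [scanL_skip l (r.getD i 0) (l.length - 1) t ht1
                (fun k hk hk' => lt_of_lt_of_le (ht3 k hk hk') hwv)]
        have hnone : nl (l ++ r) (l.length + i) = scanL l (r.getD i 0) (l.length - 1) := by
          rw [nl_append l r hm i hir, hnl]; rfl
        refine aMergeL_spec l r hm (i + 1) (by omega) _ ?_ _ (r.getD i 0)
          (by rw [hchase]) ?_
        · rw [hrl, set_map_range _ _ _ _ hir]
          apply List.map_congr_left
          intro k hk
          rw [List.mem_range] at hk
          by_cases hke : k = i
          · subst hke
            rw [if_pos rfl, if_pos (by omega), hchase, hnone]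
          · rw [if_neg hke]
            by_cases hkl : k < i
            · rw [if_pos hkl, if_pos (by omega)]
            · rw [if_neg hkl, if_neg (by omega)]
        · intro k hk hk' hknone
          cases k with
          | zero => omega
          | succ k' =>
              have := scanL_none r _ k' hknone i (by omega)
              omega
  · have hieq : i = r.length := by omega
    conv_lhs => rw [aMergeL]
    rw [dif_neg hir, hrl]
    apply List.map_congr_left
    intro k hk
    rw [List.mem_range] at hk
    rw [if_pos (by omega)]
termination_by r.length - i

theorem aMergeR_spec (l r : List Int) (hm : 1 ≤ l.length) (hr : 1 ≤ r.length)
    (c : Nat) (hc : c ≤ l.length)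
    (ll : List (Option Int))
    (hll : ll = (List.range l.length).map (fun k =>
      if c ≤ k then ocast (nr (l ++ r) k) else ocast (nr l k)))
    (p : Option Int) (w : Int) (hp : p = ocast (scanR r w 0))
    (hw : ∀ k, k < c → nr l k = none → w ≤ l.getD k 0) :
    aMergeR r (specR r) l c ll p =
      (List.range l.length).map (fun k => ocast (nr (l ++ r) k)) := by
  cases c with
  | zero =>
      show ll = _
      rw [hll]
      apply List.map_congr_left
      intro k hk
      rw [if_pos (by omega)]
  | succ c =>
      have hcl : c < l.length := by omega
      have hget : ll.getD c none = ocast (nr l c) := by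
        rw [hll, getD_map_range' _ _ c _ hcl, if_neg (by omega)]
      rw [show aMergeR r (specR r) l (c + 1) ll p
            = (match ll.getD c none with
               | some _ => aMergeR r (specR r) l c ll p
               | none =>
                   match aChase r (specR r) (l.getD c 0) p (r.length + 1) with
                   | none => aMergeR r (specR r) l c (ll.set c none) none
                   | some x =>
                       aMergeR r (specR r) l c (ll.set c (some (x + (l.length : Int))))
                         (some x)) from rfl]
      rw [hget]
      cases hnr : nr l c with
      | some t =>
          show aMergeR r (specR r) l c ll p = _
          have ht : nr (l ++ r) c = some t := by
            rw [nr_append_low l r c hcl, hnr]; rfl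
          refine aMergeR_spec l r hm hr c (by omega) _ ?_ p w hp
            (fun k hk h3 => hw k (by omega) h3)
          rw [hll]
          apply List.map_congr_left
          intro k hk
          rw [List.mem_range] at hk
          by_cases hke : k = c
          · subst hke
            rw [if_neg (by omega), if_pos (by omega), ht, hnr]
          · by_cases h1 : c + 1 ≤ k
            · rw [if_pos h1, if_pos (by omega)]
            · rw [if_neg h1, if_neg (by omega)]
      | none =>
          have hwv : w ≤ l.getD c 0 := hw c (by omega) hnr
          have hchase : aChase r (specR r) (l.getD c 0) p (r.length + 1)
              = ocast (scanR r (l.getD c 0) 0) := by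
            cases hscan : scanR r w 0 with
            | none =>
                rw [hp, hscan, show ocast none = none from rfl, aChase_none]
                rw [scanR_none_of r (l.getD c 0) 0
                  (fun k hk hk' =>
                    lt_of_lt_of_le (scanR_none r w 0 hscan k hk hk') hwv)]
                rfl
            | some t =>
                obtain ⟨_ht0, ht1, ht2, ht3⟩ := scanR_some r w 0 t hscan
                rw [hp, hscan, show ocast (some t) = some ((t : Int)) from rfl]
                rw [aChase_eq_scanR r (specR r) (l.getD c 0) (r.length + 1) t ht1 (by omega)
                  (fun k hk hk' => by
                    unfold specR
                    rw [getD_map_range' _ _ k _ (by omega)])]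
                rw [← scanR_skip r (l.getD c 0) 0 t (by omega)
                  (fun k hk hk' => lt_of_lt_of_le (ht3 k (by omega) hk') hwv)]
          have hlow : nr (l ++ r) c
              = (scanR r (l.getD c 0) 0).map (fun t => l.length + t) := by
            rw [nr_append_low l r c hcl, hnr]; rfl
          have hwnew : ∀ k, k < c → nr l k = none → l.getD c 0 ≤ l.getD k 0 := by
            intro k hk hknone
            have := scanR_none l _ (k + 1) hknone c (by omega) hcl
            omega
          rw [hchase]
          cases hscan0 : scanR r (l.getD c 0) 0 with
          | none =>
              show aMergeR r (specR r) l c (ll.set c none) none = _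
              refine aMergeR_spec l r hm hr c (by omega) _ ?_ none (l.getD c 0)
                (by rw [hscan0]; rfl) hwnew
              rw [hll, set_map_range _ _ _ _ hcl]
              apply List.map_congr_left
              intro k hk
              rw [List.mem_range] at hk
              by_cases hke : k = c
              · subst hke
                rw [if_pos rfl, if_pos (by omega), hlow, hscan0]
                rfl
              · rw [if_neg hke]
                by_cases h1 : c + 1 ≤ k
                · rw [if_pos h1, if_pos (by omega)]
                · rw [if_neg h1, if_neg (by omega)]
          | some t' =>
              show aMergeR r (specR r) l c
                  (ll.set c (some ((t' : Int) + (l.length : Int)))) (some ((t' : Int))) = _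
              refine aMergeR_spec l r hm hr c (by omega) _ ?_ (some ((t' : Int))) (l.getD c 0)
                (by rw [hscan0]; rfl) hwnew
              rw [hll, set_map_range _ _ _ _ hcl]
              apply List.map_congr_left
              intro k hk
              rw [List.mem_range] at hk
              by_cases hke : k = c
              · subst hke
                rw [if_pos rfl, if_pos (by omega), hlow, hscan0]
                show _ = some (((l.length + t' : Nat) : Int))
                congr 1
                push_cast; ring
              · rw [if_neg hke]
                by_cases h1 : c + 1 ≤ k
                · rw [if_pos h1, if_pos (by omega)]
                · rw [if_neg h1, if_neg (by omega)]
termination_by c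

theorem range_split (m n : Nat) (f : Nat → Option Int) :
    (List.range (m + n)).map f
      = (List.range m).map f ++ (List.range n).map (fun k => f (m + k)) := by
  rw [List.range_add, List.map_append, List.map_map]
  rfl

theorem a_merge_step (l r : List Int) (hl : 1 ≤ l.length) (hr : 1 ≤ r.length)
    (hlo : get_higher_neighbour l = [("left", specL l), ("right", specR l)])
    (hro : get_higher_neighbour r = [("left", specL r), ("right", specR r)]) :
    ([("left", dget (get_higher_neighbour l) "left" ++
        aMergeL l (dget (get_higher_neighbour l) "left") r 0
          (dget (get_higher_neighbour r) "left") (some ((l.length : Int) - 1))),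
      ("right", aMergeR r (dget (get_higher_neighbour r) "right") l l.length
          (dget (get_higher_neighbour l) "right") (some 0) ++
        (dget (get_higher_neighbour r) "right").map (fun o => o.map (· + (l.length : Int))))]
      : List (String × List (Option Int)))
      = [("left", specL (l ++ r)), ("right", specR (l ++ r))] := by
  rw [hlo, hro]
  rw [show dget [("left", specL l), ("right", specR l)] "left" = specL l from rfl,
      show dget [("left", specL r), ("right", specR r)] "left" = specL r from rfl,
      show dget [("left", specL l), ("right", specR l)] "right" = specR l from rfl,
      show dget [("left", specL r), ("right", specR r)] "right" = specR r from rfl]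
  have hmleft : aMergeL l (specL l) r 0 (specL r) (some ((l.length : Int) - 1))
      = (List.range r.length).map (fun k => ocast (nl (l ++ r) (l.length + k))) := by
    refine aMergeL_spec l r hl 0 (by omega) (specL r) ?_ _ (lob (l.getD (l.length - 1) 0) r) ?_
      (fun k _ hk _ => lob_le_getD _ r k hk)
    · unfold specL
      apply List.map_congr_left
      intro k _
      rw [if_neg (by omega)]
    · rw [scanL_of_ge l _ (l.length - 1) (lob_le_self _ _)]
      show some ((l.length : Int) - 1) = some (((l.length - 1 : Nat) : Int))
      congr 1
      omega
  have hmright : aMergeR r (specR r) l l.length (specR l) (some 0)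
      = (List.range l.length).map (fun k => ocast (nr (l ++ r) k)) := by
    refine aMergeR_spec l r hl hr l.length (le_refl _) (specR l) ?_ _
      (lob (r.getD 0 0) l) ?_ (fun k hk _ => lob_le_getD _ l k hk)
    · unfold specR
      apply List.map_congr_left
      intro k hk
      rw [List.mem_range] at hk
      rw [if_neg (by omega)]
    · rw [scanR_of_ge r _ 0 (by omega) (lob_le_self _ _)]
      rfl
  have hshift : (specR r).map (fun o => o.map (· + (l.length : Int)))
      = (List.range r.length).map (fun k => ocast (nr (l ++ r) (l.length + k))) := by
    unfold specR
    rw [List.map_map]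
    apply List.map_congr_left
    intro k hk
    rw [List.mem_range] at hk
    show (ocast (nr r k)).map (· + (l.length : Int)) = ocast (nr (l ++ r) (l.length + k))
    rw [nr_append_high l r k hk]
    cases nr r k with
    | none => rfl
    | some t =>
        show some ((t : Int) + (l.length : Int)) = some (((l.length + t : Nat) : Int))
        congr 1
        push_cast; ring
  rw [hmleft, hmright, hshift]
  have hlenL : specL (l ++ r)
      = specL l ++ (List.range r.length).map (fun k => ocast (nl (l ++ r) (l.length + k))) := by
    unfold specL
    rw [List.length_append, range_split]
    congr 1
    apply List.map_congr_left
    intro k hk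
    rw [List.mem_range] at hk
    rw [nl_append_low l r k hk]
  have hlenR : specR (l ++ r)
      = (List.range l.length).map (fun k => ocast (nr (l ++ r) k)) ++
          (List.range r.length).map (fun k => ocast (nr (l ++ r) (l.length + k))) := by
    unfold specR
    rw [List.length_append, range_split]
  rw [hlenL, hlenR]

theorem a_eq_spec (a : List Int) (ha : a ≠ []) :
    get_higher_neighbour a = [("left", specL a), ("right", specR a)] := by
  by_cases h1 : a.length = 1
  · conv_lhs => rw [get_higher_neighbour]
    rw [dif_pos h1]
    have hL : specL a = [none] := by
      unfold specL
      rw [h1]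
      rfl
    have hR : specR a = [none] := by
      have h0 : nr a 0 = none := by
        unfold nr
        apply scanR_none_of
        intro k hk hk'
        omega
      unfold specR
      rw [h1]
      show [ocast (nr a 0)] = [none]
      rw [h0]
      rfl
    rw [hL, hR]
  · have h2 : 2 ≤ a.length := by
      cases a with
      | nil => exact absurd rfl ha
      | cons x xs => simp only [List.length_cons] at h1 ⊢; omega
    have hl1 : 1 ≤ (a.take (a.length / 2)).length := by
      simp [List.length_take]; omega
    have hr1 : 1 ≤ (a.drop (a.length / 2)).length := by
      simp [List.length_drop]; omega
    have hlo := a_eq_spec (a.take (a.length / 2))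
      (by intro h; rw [h] at hl1; simp at hl1)
    have hro := a_eq_spec (a.drop (a.length / 2))
      (by intro h; rw [h] at hr1; simp at hr1)
    have key := a_merge_step (a.take (a.length / 2)) (a.drop (a.length / 2)) hl1 hr1 hlo hro
    rw [List.take_append_drop] at key
    conv_lhs => rw [get_higher_neighbour]
    rw [dif_neg h1, dif_neg (by omega)]
    exact key
termination_by a.length
decreasing_by
  · simp [List.length_take]; omega
  · simp [List.length_drop]; omega

-- ===== VERDICT (by name: the statement is the Claim_ definition above) =====
theorem get_higher_neighbour_spec : Claim_equal_get_higher_neighbour := by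
  intro array _ hpre
  unfold Spec_get_higher_neighbour
  rw [a_eq_spec array hpre, alt_eq_spec array]
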